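-- pv_equiv track=rewrite | github.com/tonyxxq/2mj | times.py | is_yisesibugao
-- ===== SOURCE A (Python) =====
-- def is_yisesibugao(data):
--     """
--     一色四步高，比如： 123234345456
--     """
--
--     # 去重且长度必须是 4
--     pais = set(data['sunzi'].keys())
--     if len(pais) != 4:
--         return False
--
--     # 一阶
--     for i in range(1, 5):
--         if set([i, i + 1, i + 2, i + 3]).issubset(pais):
--             return True
--
--     # 二阶
--     if set([1, 3, 5, 7]).issubset(pais):
--         return True
--
--     return False
-- ===== SOURCE B (Python) =====
-- def is_yisesibugao(data):
--     """
--     一色四步高，比如： 123234345456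
--     """
--     pais = sorted(set(data['sunzi'].keys()))
--     if len(pais) != 4:
--         return False
--     if pais == [1, 3, 5, 7]:
--         return True
--     return all(b - a == 1 for a, b in zip(pais, pais[1:])) and 1 <= pais[0] <= 4
-- ===== Notes on version B (the rewrite author's own statement) =====
-- stated objective: simpler
-- what changed: Replaces the enumerate-five-candidate-sets-and-subset-test strategy with a single sorted arithmetic-progression check: sort the distinct keys, special-case [1,3,5,7], otherwise test that consecutive differences are all 1 and the start lies in 1..4.
import Mathlib
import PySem

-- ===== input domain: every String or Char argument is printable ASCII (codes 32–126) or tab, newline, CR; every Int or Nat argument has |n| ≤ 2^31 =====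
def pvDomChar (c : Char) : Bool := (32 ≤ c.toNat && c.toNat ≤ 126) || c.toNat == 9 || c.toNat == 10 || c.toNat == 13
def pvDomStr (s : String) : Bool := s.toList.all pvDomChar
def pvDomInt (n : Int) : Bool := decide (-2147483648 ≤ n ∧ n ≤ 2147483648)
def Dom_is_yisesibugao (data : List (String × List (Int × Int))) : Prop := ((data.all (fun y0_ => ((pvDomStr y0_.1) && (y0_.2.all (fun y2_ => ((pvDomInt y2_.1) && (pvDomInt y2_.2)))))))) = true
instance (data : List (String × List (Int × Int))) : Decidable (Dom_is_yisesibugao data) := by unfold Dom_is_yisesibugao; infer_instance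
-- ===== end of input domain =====

-- B replaces A's enumeration of five candidate 4-sets (subset tests) by one sorted
-- arithmetic-progression check over the distinct keys: simpler, one scan after sorting.

-- ===== PORT A =====
def is_yisesibugao (data : List (String × List (Int × Int))) : Bool :=
  match PySem.Dict.get? (PySem.Dict.mk data) "sunzi" with
  | none => false  -- Python raises KeyError here; excluded by Pre_
  | some sunzi =>
    -- pais = set(data['sunzi'].keys())
    let pais : PySem.Set Int := PySem.Set.ofList (PySem.Dict.keys (PySem.Dict.mk sunzi))
    if PySem.Set.len pais ≠ 4 then false
    -- for i in range(1, 5): if set([i,i+1,i+2,i+3]).issubset(pais): return True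
    else if (PySem.List.pyRange 1 5 1).any (fun i =>
        PySem.Set.issubset (PySem.Set.ofList [i, i + 1, i + 2, i + 3]) pais) then true
    -- if set([1,3,5,7]).issubset(pais): return True
    else if PySem.Set.issubset (PySem.Set.ofList [1, 3, 5, 7]) pais then true
    else false

-- ===== PORT B =====
def is_yisesibugao_alt (data : List (String × List (Int × Int))) : Bool :=
  match PySem.Dict.get? (PySem.Dict.mk data) "sunzi" with
  | none => false  -- Python raises KeyError here; excluded by Pre_
  | some sunzi =>
    -- pais = sorted(set(data['sunzi'].keys()))
    let pais : List Int :=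
      PySem.List.sorted (PySem.Set.ofList (PySem.Dict.keys (PySem.Dict.mk sunzi))) (fun x => x)
    if pais.length ≠ 4 then false
    else if pais = [1, 3, 5, 7] then true
    -- all(b - a == 1 for a, b in zip(pais, pais[1:])) and 1 <= pais[0] <= 4
    else
      ((pais.zip (PySem.List.slice pais (some 1))).all (fun q => q.2 - q.1 == 1)) &&
        (match PySem.List.pyGet? pais 0 with
         | some a => decide (1 ≤ a ∧ a ≤ 4)
         | none => false)

-- ===== PRECONDITION & SPEC =====
-- Pre_: exactly the inputs where data['sunzi'] does not raise KeyError.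
def Pre_is_yisesibugao (data : List (String × List (Int × Int))) : Prop :=
  (PySem.Dict.get? (PySem.Dict.mk data) "sunzi").isSome = true
instance (data : List (String × List (Int × Int))) : Decidable (Pre_is_yisesibugao data) := by
  unfold Pre_is_yisesibugao; infer_instance

def pvWitness_is_yisesibugao : (List (String × List (Int × Int))) :=
  [("sunzi", [(1, 2), (2, 0), (3, 1), (4, 5)])]

def Spec_is_yisesibugao (data : List (String × List (Int × Int))) (out : Bool) : Prop := out = is_yisesibugao_alt data
instance (data : List (String × List (Int × Int))) (out : Bool) : Decidable (Spec_is_yisesibugao data out) := by unfold Spec_is_yisesibugao; infer_instance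

-- ===== CLAIM (what is proved, stated in full; the proofs are below) =====
def Claim_equal_is_yisesibugao : Prop := ∀ (data : List (String × List (Int × Int))), Dom_is_yisesibugao data → Pre_is_yisesibugao data → Spec_is_yisesibugao data (is_yisesibugao data)

-- ===== LEMMAS AND PROOFS =====

-- Core: on any duplicate-free key list p, A's body and B's body agree.
set_option maxHeartbeats 1000000 in
theorem pv_core (p : List Int) (hnd : p.Nodup) :
    (if PySem.Set.len p ≠ 4 then false
     else if (PySem.List.pyRange 1 5 1).any (fun i =>
         PySem.Set.issubset (PySem.Set.ofList [i, i + 1, i + 2, i + 3]) p) then true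
     else if PySem.Set.issubset (PySem.Set.ofList [1, 3, 5, 7]) p then true
     else false)
    =
    (let s := PySem.List.sorted p (fun x => x)
     if s.length ≠ 4 then false
     else if s = [1, 3, 5, 7] then true
     else
       ((s.zip (PySem.List.slice s (some 1))).all (fun q => q.2 - q.1 == 1)) &&
         (match PySem.List.pyGet? s 0 with
          | some a => decide (1 ≤ a ∧ a ≤ 4)
          | none => false)) := by
  have hperm : (PySem.List.sorted p (fun x => x)).Perm p := PySem.List.sorted_perm p _ false
  have hlen : (PySem.List.sorted p (fun x => x)).length = p.length := hperm.length_eq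
  have hpw : (PySem.List.sorted p (fun x => x)).Pairwise (fun a b => a ≤ b) :=
    PySem.List.sorted_pairwise p (fun x => x)
  have hsnd : (PySem.List.sorted p (fun x => x)).Nodup := hperm.nodup_iff.mpr hnd
  have hmem : ∀ x : Int, x ∈ p ↔ x ∈ PySem.List.sorted p (fun x => x) :=
    fun x => (hperm.mem_iff).symm
  simp only [PySem.Set.len]
  by_cases h4 : p.length = 4
  · rcases hs : PySem.List.sorted p (fun x => x) with _ | ⟨a, _ | ⟨b, _ | ⟨c, _ | ⟨d, _ | ⟨e, t⟩⟩⟩⟩⟩ <;>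
      rw [hs] at hlen <;> simp [h4] at hlen
    rw [hs] at hpw hsnd hmem
    obtain ⟨ha, hpw⟩ := List.pairwise_cons.mp hpw
    obtain ⟨hb, hpw⟩ := List.pairwise_cons.mp hpw
    obtain ⟨hc, -⟩ := List.pairwise_cons.mp hpw
    obtain ⟨na, hsnd⟩ := List.nodup_cons.mp hsnd
    obtain ⟨nb, hsnd⟩ := List.nodup_cons.mp hsnd
    obtain ⟨nc, -⟩ := List.nodup_cons.mp hsnd
    have hab : a < b := lt_of_le_of_ne (ha b (by simp)) (fun h => na (by simp [h]))
    have hbc : b < c := lt_of_le_of_ne (hb c (by simp)) (fun h => nb (by simp [h]))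
    have hcd : c < d := lt_of_le_of_ne (hc d (by simp)) (fun h => nc (by simp [h]))
    have hrange : PySem.List.pyRange 1 5 1 = [1, 2, 3, 4] := by decide
    have hsl : PySem.List.slice [a, b, c, d] (some 1) = [b, c, d] := by
      simp [PySem.List.slice]
    have hg0 : PySem.List.pyGet? [a, b, c, d] (0 : Int) = some a := by
      simp [PySem.List.pyGet?, PySem.List.pyIdx?]
    rw [Bool.eq_iff_iff]
    simp only [h4, hrange, hsl, hg0]
    simp [PySem.Set.issubset_iff, PySem.Set.mem_ofList, hmem, List.cons.injEq, beq_iff_eq]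
    omega
  · have : ¬ ((p.length : Int) = 4) := by exact_mod_cast h4
    simp [this, hlen, h4]

-- ===== VERDICT (by name: the statement is the Claim_ definition above) =====
theorem is_yisesibugao_spec : Claim_equal_is_yisesibugao := by
  unfold Claim_equal_is_yisesibugao
  intro data _ _
  unfold Spec_is_yisesibugao is_yisesibugao is_yisesibugao_alt
  cases PySem.Dict.get? (PySem.Dict.mk data) "sunzi" with
  | none => rfl
  | some sunzi =>
    exact pv_core _ (PySem.Set.nodup_ofList _)
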